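-- pv_equiv track=rewrite | github.com/nonsensejoke/my_code_snippets | pdb_seq_alignment/protein_alignment.py | extract_residue_sequence
-- ===== SOURCE A (Python) =====
-- from typing import List, Tuple, Dict
--
-- def extract_residue_sequence(atoms: List[Dict], chain_id: str) -> List[Dict]:
--     """
--     从指定链中提取残基序列
--
--     Args:
--         atoms: 原子信息列表
--         chain_id: 链标识符
--
--     Returns:
--         残基信息列表（包含res_seq和res_name）
--     """
--     # 收集指定链的所有残基
--     residues = {}
--     for atom in atoms:
--         if atom['chain_id'] == chain_id:
--             res_seq = atom['res_seq']
--             res_name = atom['res_name']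
--             if res_seq not in residues:
--                 residues[res_seq] = res_name
--
--     # 按残基序号排序并返回残基信息列表
--     sorted_residues = sorted(residues.items())
--     return [{'res_seq': res_seq, 'res_name': res_name} for res_seq, res_name in sorted_residues]
-- ===== SOURCE B (Python) =====
-- from typing import List, Dict
--
-- def extract_residue_sequence(atoms: List[Dict], chain_id: str) -> List[Dict]:
--     # sort-then-dedup: stable sort keeps the first-seen atom of each res_seq in front
--     chain_atoms = [atom for atom in atoms if atom['chain_id'] == chain_id]
--     chain_atoms.sort(key=lambda a: a['res_seq'])
--     seen = set()
--     result = []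
--     for atom in chain_atoms:
--         res_seq = atom['res_seq']
--         if res_seq not in seen:
--             seen.add(res_seq)
--             result.append({'res_seq': res_seq, 'res_name': atom['res_name']})
--     return result
-- ===== Notes on version B (the rewrite author's own statement) =====
-- stated objective: alternative
-- what changed: Replaces A's dedup-then-sort (first-seen dict of residues, then sorted(items)) by sort-then-dedup: filter the chain's atoms, stable-sort them by res_seq alone, and take the first atom of each res_seq group in one scan with a seen-set.
import Mathlib
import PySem

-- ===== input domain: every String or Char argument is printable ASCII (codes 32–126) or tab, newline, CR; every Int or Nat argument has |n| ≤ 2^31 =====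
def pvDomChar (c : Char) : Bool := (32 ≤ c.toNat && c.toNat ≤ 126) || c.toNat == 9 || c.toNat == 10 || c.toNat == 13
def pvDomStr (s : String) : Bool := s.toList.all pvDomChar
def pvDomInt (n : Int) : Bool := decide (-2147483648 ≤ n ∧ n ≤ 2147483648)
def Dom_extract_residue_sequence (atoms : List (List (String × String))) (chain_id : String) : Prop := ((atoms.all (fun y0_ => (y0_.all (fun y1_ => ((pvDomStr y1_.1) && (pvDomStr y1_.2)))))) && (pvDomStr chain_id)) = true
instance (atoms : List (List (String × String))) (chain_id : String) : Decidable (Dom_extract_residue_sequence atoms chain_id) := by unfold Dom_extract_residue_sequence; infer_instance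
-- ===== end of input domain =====

-- B replaces A's first-seen dict + sorted(items) by filter, stable sort on res_seq, and a
-- single dedup scan keeping the first atom of each res_seq group ('alternative' objective).

-- ===== PORT A =====
-- atom['k'] : first-match association-list lookup; total form of the dict access, exact under Pre_
def pvAget (atom : List (String × String)) (k : String) : String :=
  (PySem.Dict.mk atom).getD k ""

def extract_residue_sequence (atoms : List (List (String × String))) (chain_id : String) : List (List (String × String)) :=
  let residues : PySem.Dict String String := atoms.foldl (fun residues atom =>
    if pvAget atom "chain_id" == chain_id then
      let res_seq := pvAget atom "res_seq"
      let res_name := pvAget atom "res_name"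
      if !(residues.contains res_seq) then residues.insert res_seq res_name else residues
    else residues) PySem.Dict.empty
  let sorted_residues := PySem.List.sorted2 residues.items (fun p => p.1) (fun p => p.2)
  sorted_residues.map (fun p => [("res_seq", p.1), ("res_name", p.2)])

-- ===== PORT B =====
def extract_residue_sequence_alt (atoms : List (List (String × String))) (chain_id : String) : List (List (String × String)) :=
  let chain_atoms := atoms.filter (fun atom => pvAget atom "chain_id" == chain_id)
  let sorted_atoms := PySem.List.sorted chain_atoms (fun atom => pvAget atom "res_seq")
  (sorted_atoms.foldl (fun (st : PySem.Set String × List (List (String × String))) atom =>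
      let res_seq := pvAget atom "res_seq"
      if PySem.Set.contains st.1 res_seq then st
      else (PySem.Set.add st.1 res_seq,
            st.2 ++ [[("res_seq", res_seq), ("res_name", pvAget atom "res_name")]]))
    (PySem.Set.empty, [])).2

-- ===== PRECONDITION & SPEC =====
-- Pre_ excludes exactly the inputs where Python A raises KeyError: an atom without a
-- 'chain_id' key, or a matching atom without 'res_seq'/'res_name'.
def Pre_extract_residue_sequence (atoms : List (List (String × String))) (chain_id : String) : Prop :=
  ∀ atom ∈ atoms, (PySem.Dict.mk atom).contains "chain_id" = true ∧
    (pvAget atom "chain_id" = chain_id →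
      (PySem.Dict.mk atom).contains "res_seq" = true ∧ (PySem.Dict.mk atom).contains "res_name" = true)
instance (atoms : List (List (String × String))) (chain_id : String) : Decidable (Pre_extract_residue_sequence atoms chain_id) := by unfold Pre_extract_residue_sequence; infer_instance

def pvWitness_extract_residue_sequence : (List (List (String × String))) × String :=
  ([[("chain_id", "A"), ("res_seq", "1"), ("res_name", "GLY")],
    [("chain_id", "A"), ("res_seq", "2"), ("res_name", "ALA")],
    [("chain_id", "B"), ("res_seq", "9")]], "A")

def Spec_extract_residue_sequence (atoms : List (List (String × String))) (chain_id : String) (out : List (List (String × String))) : Prop := out = extract_residue_sequence_alt atoms chain_id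
instance (atoms : List (List (String × String))) (chain_id : String) (out : List (List (String × String))) : Decidable (Spec_extract_residue_sequence atoms chain_id out) := by unfold Spec_extract_residue_sequence; infer_instance

-- ===== CLAIM (what is proved, stated in full; the proofs are below) =====
def Claim_equal_extract_residue_sequence : Prop := ∀ (atoms : List (List (String × String))) (chain_id : String), Dom_extract_residue_sequence atoms chain_id → Pre_extract_residue_sequence atoms chain_id → Spec_extract_residue_sequence atoms chain_id (extract_residue_sequence atoms chain_id)

-- ===== LEMMAS AND PROOFS =====

-- the residue pair an atom contributes, and the output row formatting
def pvPair (atom : List (String × String)) : String × String :=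
  (pvAget atom "res_seq", pvAget atom "res_name")
def pvFmt (p : String × String) : List (String × String) :=
  [("res_seq", p.1), ("res_name", p.2)]

-- first-occurrence dedup by key, threading the set of already-seen keys
def pvScan : List (String × String) → List String → List (String × String)
  | [], _ => []
  | p :: ps, seen => if p.1 ∈ seen then pvScan ps seen else p :: pvScan ps (seen ++ [p.1])

theorem pvScan_sublist (l : List (String × String)) (seen : List String) :
    (pvScan l seen).Sublist l := by
  induction l generalizing seen with
  | nil => simp [pvScan]
  | cons p ps ih =>
    simp only [pvScan]
    split_ifs with h
    · exact (ih seen).cons p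
    · exact (ih (seen ++ [p.1])).cons₂ p

theorem pvScan_not_seen (l : List (String × String)) (seen : List String) :
    ∀ p ∈ pvScan l seen, p.1 ∉ seen := by
  induction l generalizing seen with
  | nil => simp [pvScan]
  | cons q ps ih =>
    simp only [pvScan]
    split_ifs with h
    · exact ih seen
    · intro p hp
      rcases List.mem_cons.mp hp with rfl | hp
      · exact h
      · intro hs
        exact ih (seen ++ [q.1]) p hp (List.mem_append.mpr (Or.inl hs))

theorem pvScan_keys_nodup (l : List (String × String)) (seen : List String) :
    ((pvScan l seen).map Prod.fst).Nodup := by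
  induction l generalizing seen with
  | nil => simp [pvScan]
  | cons q ps ih =>
    simp only [pvScan]
    split_ifs with h
    · exact ih seen
    · simp only [List.map_cons, List.nodup_cons]
      refine ⟨?_, ih (seen ++ [q.1])⟩
      intro hmem
      rcases List.mem_map.mp hmem with ⟨p, hp, hk⟩
      exact pvScan_not_seen ps (seen ++ [q.1]) p hp (by simp [hk])

theorem pvScan_mem (l : List (String × String)) (seen : List String) (p : String × String) :
    p ∈ pvScan l seen ↔ p.1 ∉ seen ∧ l.find? (fun q => q.1 == p.1) = some p := by
  induction l generalizing seen with
  | nil => simp [pvScan]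
  | cons q ps ih =>
    simp only [pvScan]
    split_ifs with h
    · rw [ih seen]
      constructor
      · rintro ⟨hns, hf⟩
        refine ⟨hns, ?_⟩
        rw [List.find?_cons_of_neg, hf]
        simp only [beq_iff_eq]
        intro he; exact hns (he ▸ h)
      · rintro ⟨hns, hf⟩
        refine ⟨hns, ?_⟩
        rw [List.find?_cons_of_neg] at hf
        · exact hf
        · simp only [beq_iff_eq]
          intro he; exact hns (he ▸ h)
    · by_cases hpq : p = q
      · subst hpq
        simp [List.find?_cons_of_pos, h]
      · constructor
        · intro hp
          rcases List.mem_cons.mp hp with rfl | hp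
          · exact absurd rfl hpq
          · rcases (ih (seen ++ [q.1])).mp hp with ⟨hns, hf⟩
            have hne : q.1 ≠ p.1 := by
              intro he; exact hns (List.mem_append.mpr (Or.inr (by simp [he])))
            refine ⟨fun hs => hns (List.mem_append.mpr (Or.inl hs)), ?_⟩
            rw [List.find?_cons_of_neg, hf]
            simpa using hne
        · rintro ⟨hns, hf⟩
          by_cases hk : q.1 = p.1
          · rw [List.find?_cons_of_pos (by simpa using hk)] at hf
            exact absurd (Option.some.inj hf).symm hpq
          · rw [List.find?_cons_of_neg (by simpa using hk)] at hf
            refine List.mem_cons.mpr (Or.inr ((ih (seen ++ [q.1])).mpr ⟨?_, hf⟩))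
            intro hs
            rcases List.mem_append.mp hs with hs | hs
            · exact hns hs
            · exact hk (List.mem_singleton.mp hs).symm

-- A's dict-building loop, reduced to pvScan of the contributed pairs
theorem pvFoldl_dict (ps : List (String × String)) :
    ∀ d : PySem.Dict String String,
      (ps.foldl (fun d p => if !(d.contains p.1) then d.insert p.1 p.2 else d) d).items
        = d.items ++ pvScan ps (d.items.map Prod.fst) := by
  induction ps with
  | nil => intro d; simp [pvScan]
  | cons p ps ih =>
    intro d
    simp only [List.foldl_cons, pvScan]
    by_cases h : p.1 ∈ d.items.map Prod.fst
    · have hc : d.contains p.1 = true := by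
        rw [PySem.Dict.contains_eq_decide_mem_keys]
        simpa [PySem.Dict.keys] using h
      rw [if_neg (by simp [hc]), if_pos h]
      exact ih d
    · have hc : d.contains p.1 = false := by
        rw [PySem.Dict.contains_eq_decide_mem_keys]
        simpa [PySem.Dict.keys] using h
      have hins : (d.insert p.1 p.2).items = d.items ++ [p] := by
        simp [PySem.Dict.insert, hc]
      rw [if_pos (by simp [hc]), if_neg h, ih (d.insert p.1 p.2), hins]
      simp

-- insertBy respects a pointwise-equal comparison
theorem pvInsertBy_congr {α : Type} (b1 b2 : α → α → Bool) (x : α) (ys : List α)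
    (h : ∀ y ∈ ys, b1 x y = b2 x y) :
    PySem.List.insertBy b1 x ys = PySem.List.insertBy b2 x ys := by
  induction ys with
  | nil => rfl
  | cons y ys ih =>
    simp only [PySem.List.insertBy]
    rw [h y (List.mem_cons_self), ih (fun z hz => h z (List.mem_cons_of_mem y hz))]

-- insertBy commutes with map when the comparison factors through the map
theorem pvMap_insertBy {α β : Type} (f : α → β) (bf : β → β → Bool) (x : α) (ys : List α) :
    (PySem.List.insertBy (fun a b => bf (f a) (f b)) x ys).map f
      = PySem.List.insertBy bf (f x) (ys.map f) := by
  induction ys with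
  | nil => rfl
  | cons y ys ih =>
    simp only [PySem.List.insertBy, List.map_cons]
    by_cases h : bf (f x) (f y)
    · simp [h]
    · simp [h, ih]

-- sorting atoms by a key of their image = mapping then sorting the images
theorem pvSorted_map {α β κ : Type} [LT κ] [DecidableLT κ] (f : α → β) (key : β → κ)
    (xs : List α) :
    (PySem.List.sorted xs (fun a => key (f a))).map f
      = PySem.List.sorted (xs.map f) key := by
  rw [PySem.List.sorted_eq_foldl_insertBy, PySem.List.sorted_eq_foldl_insertBy]
  suffices h : ∀ (acc : List α),
      ((xs.foldl (fun acc x => PySem.List.insertBy (fun a b => decide (key (f a) < key (f b))) x acc) acc).map f)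
        = (xs.map f).foldl (fun acc x => PySem.List.insertBy (fun a b => decide (key a < key b)) x acc) (acc.map f) by
    simpa using h []
  induction xs with
  | nil => intro acc; rfl
  | cons x xs ih =>
    intro acc
    simp only [List.foldl_cons, List.map_cons]
    rw [ih, pvMap_insertBy f (fun a b => decide (key a < key b)) x acc]

-- B's output loop, reduced to pvScan of the pairs
theorem pvFoldl_B (l : List (List (String × String))) :
    ∀ (seen : List String) (out : List (List (String × String))),
      (l.foldl (fun (st : PySem.Set String × List (List (String × String))) atom =>
          if PySem.Set.contains st.1 (pvAget atom "res_seq") then st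
          else (PySem.Set.add st.1 (pvAget atom "res_seq"),
                st.2 ++ [[("res_seq", pvAget atom "res_seq"), ("res_name", pvAget atom "res_name")]]))
        (seen, out)).2
      = out ++ (pvScan (l.map pvPair) seen).map pvFmt := by
  induction l with
  | nil => intro seen out; simp [pvScan]
  | cons a l ih =>
    intro seen out
    simp only [List.foldl_cons, List.map_cons, pvScan]
    by_cases h : pvAget a "res_seq" ∈ seen
    · have hc : PySem.Set.contains seen (pvAget a "res_seq") = true := by
        simpa [PySem.Set.contains] using h
      rw [if_pos hc, if_pos (show (pvPair a).1 ∈ seen from h)]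
      exact ih seen out
    · have hadd : PySem.Set.add seen (pvAget a "res_seq") = seen ++ [pvAget a "res_seq"] := by
        simp [PySem.Set.add, h]
      rw [if_neg (by simpa using h), if_neg (show ¬ (pvPair a).1 ∈ seen from h), hadd,
        ih (seen ++ [pvAget a "res_seq"]) _]
      simp [pvPair, pvFmt]

-- filtering an equal-key class commutes with insertion into a key-sorted list
theorem pvFilter_insertBy_self {α κ : Type} [LinearOrder κ] (key : α → κ) (x : α)
    (acc : List α) (hs : acc.Pairwise (fun a b => key a ≤ key b)) :
    (PySem.List.insertBy (fun a b => decide (key a < key b)) x acc).filter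
        (fun a => key a == key x)
      = acc.filter (fun a => key a == key x) ++ [x] := by
  induction acc with
  | nil => simp [PySem.List.insertBy]
  | cons y ys ih =>
    simp only [PySem.List.insertBy]
    by_cases h : key x < key y
    · rw [if_pos (by simpa using h)]
      have hy : (key y == key x) = false := beq_eq_false_iff_ne.mpr (ne_of_gt h)
      have hys : (y :: ys).filter (fun a => key a == key x) = [] := by
        rw [List.filter_eq_nil_iff]
        intro a ha
        rcases List.mem_cons.mp ha with rfl | ha
        · simp [hy]
        · have hle := (List.pairwise_cons.mp hs).1 a ha
          simp only [beq_iff_eq]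
          exact fun he => absurd (he ▸ hle) (not_le.mpr h)
      rw [hys, List.filter_cons, List.filter_cons, if_pos (by simp)]
      have hysf : ys.filter (fun a => key a == key x) = [] := by
        rw [List.filter_eq_nil_iff]
        intro a ha
        have hle := (List.pairwise_cons.mp hs).1 a ha
        simp only [beq_iff_eq]
        exact fun he => absurd (he ▸ hle) (not_le.mpr h)
      simp [hy, hysf]
    · rw [if_neg (by simpa using h)]
      rw [List.filter_cons, List.filter_cons, ih (List.pairwise_cons.mp hs).2]
      by_cases hy : (key y == key x) = true <;> simp [hy]

theorem pvFilter_insertBy_ne {α κ : Type} [LinearOrder κ] (key : α → κ) (x : α) (k : κ)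
    (hk : ¬ k = key x) (acc : List α) :
    (PySem.List.insertBy (fun a b => decide (key a < key b)) x acc).filter
        (fun a => key a == k)
      = acc.filter (fun a => key a == k) := by
  have hx : (key x == k) = false := beq_eq_false_iff_ne.mpr (fun he => hk he.symm)
  induction acc with
  | nil => simp [PySem.List.insertBy, hx]
  | cons y ys ih =>
    simp only [PySem.List.insertBy]
    by_cases h : key x < key y
    · rw [if_pos (by simpa using h)]
      simp [List.filter_cons, hx]
    · rw [if_neg (by simpa using h)]
      rw [List.filter_cons, List.filter_cons, ih]

-- PySem's sort is stable: each equal-key class is preserved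
theorem pvFilter_sorted {α κ : Type} [LinearOrder κ] (key : α → κ) (l : List α) (k : κ) :
    (PySem.List.sorted l key).filter (fun a => key a == k)
      = l.filter (fun a => key a == k) := by
  induction l using List.reverseRecOn with
  | nil => rfl
  | append_singleton l x ih =>
    have hstep : PySem.List.sorted (l ++ [x]) key
        = PySem.List.insertBy (fun a b => decide (key a < key b)) x (PySem.List.sorted l key) := by
      rw [PySem.List.sorted_eq_foldl_insertBy, PySem.List.sorted_eq_foldl_insertBy, List.foldl_append]
      rfl
    rw [hstep, List.filter_append]
    by_cases hk : k = key x
    · subst hk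
      rw [pvFilter_insertBy_self key x _ (PySem.List.sorted_pairwise l key), ih]
      simp
    · rw [pvFilter_insertBy_ne key x k hk, ih]
      simp only [List.filter_cons, List.filter_nil, beq_iff_eq]
      rw [if_neg (by simpa using fun he => hk he.symm)]
      simp

theorem pvFind?_sorted {α κ : Type} [LinearOrder κ] (key : α → κ) (l : List α) (k : κ) :
    (PySem.List.sorted l key).find? (fun a => key a == k) = l.find? (fun a => key a == k) := by
  rw [← List.head?_filter, ← List.head?_filter, pvFilter_sorted]

-- with pairwise-distinct primary keys, the tuple sort degenerates to the key sort
theorem pvSorted2_eq_sorted {α κ₁ κ₂ : Type} [LinearOrder κ₁] [LT κ₂] [DecidableLT κ₂]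
    (k1 : α → κ₁) (k2 : α → κ₂) (xs : List α) (hnd : (xs.map k1).Nodup) :
    PySem.List.sorted2 xs k1 k2 = PySem.List.sorted xs k1 := by
  have aux : ∀ (xs acc : List α), (∀ x ∈ xs, ∀ y ∈ acc, k1 x ≠ k1 y) → (xs.map k1).Nodup →
      xs.foldl (fun acc x => PySem.List.insertBy
        (fun a b => decide (k1 a < k1 b) || (!decide (k1 b < k1 a) && decide (k2 a < k2 b))) x acc) acc
      = xs.foldl (fun acc x => PySem.List.insertBy (fun a b => decide (k1 a < k1 b)) x acc) acc := by
    intro xs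
    induction xs with
    | nil => intro acc _ _; rfl
    | cons x xs ih =>
      intro acc hdisj hnd
      simp only [List.foldl_cons]
      have hstep : PySem.List.insertBy
          (fun a b => decide (k1 a < k1 b) || (!decide (k1 b < k1 a) && decide (k2 a < k2 b))) x acc
          = PySem.List.insertBy (fun a b => decide (k1 a < k1 b)) x acc := by
        apply pvInsertBy_congr
        intro y hy
        have hne : k1 x ≠ k1 y := hdisj x List.mem_cons_self y hy
        by_cases hlt : k1 x < k1 y
        · simp [hlt]
        · have hgt : k1 y < k1 x := lt_of_le_of_ne (not_lt.mp hlt) (Ne.symm hne)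
          simp [hlt, hgt]
      rw [hstep]
      apply ih
      · intro x' hx' y hy
        rcases (PySem.List.mem_insertBy _ x y acc).mp hy with rfl | hy
        · intro he
          have : k1 x' ∈ xs.map k1 := List.mem_map.mpr ⟨x', hx', rfl⟩
          rw [List.map_cons, List.nodup_cons] at hnd
          exact hnd.1 (he ▸ this)
        · exact hdisj x' (List.mem_cons_of_mem x hx') y hy
      · rw [List.map_cons, List.nodup_cons] at hnd
        exact hnd.2
  rw [PySem.List.sorted_eq_foldl_insertBy]
  show List.foldl _ [] xs = _
  simp only [Bool.false_eq_true, if_false]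
  exact aux xs [] (by simp) hnd

-- A's atom loop = the pair loop over the chain's pairs
theorem pvFoldl_A (atoms : List (List (String × String))) (chain_id : String) :
    ∀ d : PySem.Dict String String,
      atoms.foldl (fun residues atom =>
        if pvAget atom "chain_id" == chain_id then
          let res_seq := pvAget atom "res_seq"
          let res_name := pvAget atom "res_name"
          if !(residues.contains res_seq) then residues.insert res_seq res_name else residues
        else residues) d
      = ((atoms.filter (fun a => pvAget a "chain_id" == chain_id)).map pvPair).foldl
          (fun d p => if !(d.contains p.1) then d.insert p.1 p.2 else d) d := by
  induction atoms with
  | nil => intro d; rfl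
  | cons a atoms ih =>
    intro d
    by_cases hm : (pvAget a "chain_id" == chain_id) = true
    · simp only [List.foldl_cons, List.filter_cons, hm, if_true, List.map_cons]
      exact ih _
    · simp only [List.foldl_cons, List.filter_cons, hm, Bool.false_eq_true, if_false]
      exact ih d

-- the heart: dedup-then-sort equals stable-sort-then-dedup
theorem pvCore (ps : List (String × String)) :
    PySem.List.sorted2 (pvScan ps []) Prod.fst Prod.snd
      = pvScan (PySem.List.sorted ps Prod.fst) [] := by
  rw [pvSorted2_eq_sorted Prod.fst Prod.snd _ (pvScan_keys_nodup ps [])]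
  apply PySem.List.sorted_eq_of_perm_of_pairwise_lt
  · apply (List.perm_ext_iff_of_nodup ?_ ?_).mpr
    · intro p
      rw [pvScan_mem, pvScan_mem, pvFind?_sorted Prod.fst ps p.1]
    · exact (pvScan_keys_nodup _ []).of_map
    · exact (pvScan_keys_nodup _ []).of_map
  · have hle : (pvScan (PySem.List.sorted ps Prod.fst) []).Pairwise
        (fun a b => a.1 ≤ b.1) :=
      (PySem.List.sorted_pairwise ps Prod.fst).sublist (pvScan_sublist _ [])
    have hne : (pvScan (PySem.List.sorted ps Prod.fst) []).Pairwise
        (fun a b => a.1 ≠ b.1) :=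
      List.pairwise_map.mp (pvScan_keys_nodup (PySem.List.sorted ps Prod.fst) [])
    exact (hle.and hne).imp (fun h => lt_of_le_of_ne h.1 h.2)

-- ===== VERDICT (by name: the statement is the Claim_ definition above) =====
theorem extract_residue_sequence_spec : Claim_equal_extract_residue_sequence := by
  intro atoms chain_id _ _
  show extract_residue_sequence atoms chain_id = extract_residue_sequence_alt atoms chain_id
  unfold extract_residue_sequence extract_residue_sequence_alt
  dsimp only []
  rw [pvFoldl_A atoms chain_id PySem.Dict.empty]
  rw [pvFoldl_dict (((atoms.filter (fun a => pvAget a "chain_id" == chain_id)).map pvPair)) PySem.Dict.empty]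
  rw [pvFoldl_B (PySem.List.sorted (atoms.filter (fun a => pvAget a "chain_id" == chain_id)) (fun a => pvAget a "res_seq")) PySem.Set.empty []]
  have hkey : (fun a => pvAget a "res_seq") = (fun a : List (String × String) => (pvPair a).1) := rfl
  rw [hkey, pvSorted_map pvPair Prod.fst]
  have hempty : (PySem.Dict.empty : PySem.Dict String String).items = [] := rfl
  rw [hempty]
  simp only [List.nil_append, List.map_nil]
  exact congrArg (List.map pvFmt)
    (pvCore ((atoms.filter (fun a => pvAget a "chain_id" == chain_id)).map pvPair))
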